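-- pv_equiv track=rewrite | github.com/Jhordan1030/repo-ANAALG-grupo | Trabajo2/Ejercicio4/Ejercicio4.py | suma_filas_recursivo
-- ===== SOURCE A (Python) =====
-- def suma_filas_recursivo(matriz, i=None):
--     # Caso base: Si la matriz está vacía, retornar [0]
--     if not matriz:
--         return [0]
--     if i is None:
--         i = len(matriz) - 1
--     if i < 0:
--         return []
--     suma_actual = sum(matriz[i])
--     return suma_filas_recursivo(matriz, i - 1) + [suma_actual]
-- ===== SOURCE B (Python) =====
-- def suma_filas_recursivo(matriz, i=None):
--     # Iterative: map sum over the prefix of rows, no recursion, no index bookkeeping.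
--     if not matriz:
--         return [0]
--     n = len(matriz) if i is None else i + 1
--     return [sum(row) for row in matriz[:max(n, 0)]]
-- ===== Notes on version B (the rewrite author's own statement) =====
-- stated objective: simpler
-- what changed: Replaces the index-driven recursion (and its list-concatenation per row) with a single list comprehension over a prefix slice of the rows.
-- outside the precondition, e.g. on suma_filas_recursivo([[1, 2]], 1): A raises IndexError, B returns [3]
import Mathlib
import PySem

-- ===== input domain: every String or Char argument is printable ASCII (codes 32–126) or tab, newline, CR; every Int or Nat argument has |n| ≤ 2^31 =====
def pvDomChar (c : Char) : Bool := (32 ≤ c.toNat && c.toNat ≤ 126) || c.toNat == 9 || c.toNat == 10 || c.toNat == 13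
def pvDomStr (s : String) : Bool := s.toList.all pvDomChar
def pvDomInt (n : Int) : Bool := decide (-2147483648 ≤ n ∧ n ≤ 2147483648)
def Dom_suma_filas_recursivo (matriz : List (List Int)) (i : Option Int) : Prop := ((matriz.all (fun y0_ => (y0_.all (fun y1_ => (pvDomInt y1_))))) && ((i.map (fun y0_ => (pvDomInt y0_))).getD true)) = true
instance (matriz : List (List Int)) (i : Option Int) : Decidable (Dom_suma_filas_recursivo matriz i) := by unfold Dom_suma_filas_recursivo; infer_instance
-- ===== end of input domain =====

-- B replaces A's index-driven recursion with a single map over the prefix of rows (simpler).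


-- ===== PORT A =====
-- recursive helper: A's body once i is a concrete Int (matriz nonempty, unchanged across calls)
def sumaFilasRecA (matriz : List (List Int)) (i : Int) : List Int :=
  if i < 0 then []
  else
    -- sum(matriz[i]); out-of-range is IndexError in Python (excluded by Pre_)
    let suma_actual := ((PySem.List.pyGet? matriz i).getD []).sum
    sumaFilasRecA matriz (i - 1) ++ [suma_actual]
termination_by (i + 1).toNat
decreasing_by omega

def suma_filas_recursivo (matriz : List (List Int)) (i : Option Int) : List Int :=
  if matriz = [] then [0]
  else
    let i := match i with
      | none => (matriz.length : Int) - 1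
      | some n => n
    sumaFilasRecA matriz i

-- ===== PORT B =====
def suma_filas_recursivo_alt (matriz : List (List Int)) (i : Option Int) : List Int :=
  if matriz = [] then [0]
  else
    let n : Int := match i with
      | none => (matriz.length : Int)
      | some k => k + 1
    (matriz.take (max n 0).toNat).map (fun row => row.sum)

-- ===== PRECONDITION & SPEC =====
-- Pre_ excludes only the inputs on which A raises IndexError: a nonempty matrix with an
-- explicit index i ≥ number of rows.
def Pre_suma_filas_recursivo (matriz : List (List Int)) (i : Option Int) : Prop :=
  (match i with
   | none => true
   | some n => matriz.isEmpty || decide (n < (matriz.length : Int))) = true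
instance (matriz : List (List Int)) (i : Option Int) : Decidable (Pre_suma_filas_recursivo matriz i) := by unfold Pre_suma_filas_recursivo; infer_instance

def pvWitness_suma_filas_recursivo : List (List Int) × Option Int := ([[1, 2], [3]], some 1)

def Spec_suma_filas_recursivo (matriz : List (List Int)) (i : Option Int) (out : List Int) : Prop := out = suma_filas_recursivo_alt matriz i
instance (matriz : List (List Int)) (i : Option Int) (out : List Int) : Decidable (Spec_suma_filas_recursivo matriz i out) := by unfold Spec_suma_filas_recursivo; infer_instance

-- ===== CLAIM =====
def Claim_equal_suma_filas_recursivo : Prop := ∀ (matriz : List (List Int)) (i : Option Int), Dom_suma_filas_recursivo matriz i → Pre_suma_filas_recursivo matriz i → Spec_suma_filas_recursivo matriz i (suma_filas_recursivo matriz i)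

-- ===== LEMMAS AND PROOFS =====
lemma sumaFilasRecA_eq (matriz : List (List Int)) (n : Int)
    (h : n < (matriz.length : Int)) :
    sumaFilasRecA matriz n = (matriz.take (max (n + 1) 0).toNat).map (fun row => row.sum) := by
  by_cases hn : n < 0
  · rw [sumaFilasRecA]
    rw [if_pos hn]
    have : (max (n + 1) 0).toNat = 0 := by omega
    simp [this]
  · rw [sumaFilasRecA]
    have h0 : 0 ≤ n := by omega
    rw [if_neg (by omega)]
    rw [sumaFilasRecA_eq matriz (n - 1) (by omega)]
    have hk : (max (n + 1) 0).toNat = n.toNat + 1 := by omega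
    have hk' : (max (n - 1 + 1) 0).toNat = n.toNat := by omega
    rw [hk, hk']
    have hlt : n.toNat < matriz.length := by omega
    rw [PySem.List.pyGet?_of_nonneg (h := h0)]
    have hlt2 : n.toNat < (List.map (fun row => row.sum) matriz).length := by simpa using hlt
    simp only [List.getElem?_eq_getElem hlt, Option.getD_some, List.map_take]
    rw [List.take_add_one, List.getElem?_eq_getElem hlt2, List.getElem_map]
    simp
termination_by (n + 1).toNat
decreasing_by omega

-- ===== VERDICT =====
theorem suma_filas_recursivo_spec : Claim_equal_suma_filas_recursivo := by
  intro matriz i _hd hpre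
  unfold Spec_suma_filas_recursivo suma_filas_recursivo suma_filas_recursivo_alt
  by_cases hm : matriz = []
  · simp [hm]
  · rw [if_neg hm, if_neg hm]
    have hne : 0 < matriz.length := List.length_pos_iff.mpr hm
    cases i with
    | none =>
        show sumaFilasRecA matriz ((matriz.length : Int) - 1)
          = (matriz.take (max ((matriz.length : Int)) 0).toNat).map (fun row => row.sum)
        rw [sumaFilasRecA_eq matriz _ (by omega)]
        congr 2
        omega
    | some n =>
        have hlt : n < (matriz.length : Int) := by
          unfold Pre_suma_filas_recursivo at hpre
          simp at hpre
          rcases hpre with h | h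
          · exact absurd h hm
          · exact h
        exact sumaFilasRecA_eq matriz n hlt
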